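-- pv_equiv track=rewrite | github.com/jsboigeEpita/2025-Epita-Intelligence-Symbolique | argumentation_analysis/orchestration/hierarchical/strategic/allocator.py | _define_agent_priorities
-- ===== SOURCE A (Python) =====
-- from typing import Dict, List, Any, Optional
--
-- def _define_agent_priorities(agent_assignments: Dict[str, List[str]],
--                            phase_priorities: Dict[str, str]) -> Dict[str, str]:
--     """
--     Définit les niveaux de priorité pour chaque agent.
--
--     Args:
--         agent_assignments: Assignations d'agents par phase
--         phase_priorities: Priorités des phases
--
--     Returns:
--         Dictionnaire des niveaux de priorité par agent
--     """
--     priority_levels = {}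
--
--     for agent_id, assigned_phases in agent_assignments.items():
--         if not assigned_phases:
--             priority_levels[agent_id] = "low"
--             continue
--
--         # Déterminer la priorité en fonction des phases assignées
--         priority_scores = {"high": 0, "medium": 0, "low": 0}
--
--         for phase_id in assigned_phases:
--             phase_priority = phase_priorities.get(phase_id, "medium")
--             priority_scores[phase_priority] += 1
--
--         # Attribuer la priorité en fonction des scores
--         if priority_scores["high"] > 0:
--             priority_levels[agent_id] = "high"
--         elif priority_scores["medium"] > 0:
--             priority_levels[agent_id] = "medium"
--         else:
--             priority_levels[agent_id] = "low"
--
--     return priority_levels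
-- ===== SOURCE B (Python) =====
-- def _define_agent_priorities(agent_assignments, phase_priorities):
--     rank = {"high": 2, "medium": 1, "low": 0}
--     names = ["low", "medium", "high"]
--     return {
--         agent_id: names[max((rank[phase_priorities.get(p, "medium")] for p in phases),
--                             default=0)]
--         for agent_id, phases in agent_assignments.items()
--     }
-- ===== Notes on version B (the rewrite author's own statement) =====
-- stated objective: simpler
-- what changed: Replaces the per-agent three-bucket count dict, the empty-list special case and the if/elif/else cascade by a single numeric max-reduction over priority ranks (high=2, medium=1, low=0, default 0) mapped back to a name.
import Mathlib
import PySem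

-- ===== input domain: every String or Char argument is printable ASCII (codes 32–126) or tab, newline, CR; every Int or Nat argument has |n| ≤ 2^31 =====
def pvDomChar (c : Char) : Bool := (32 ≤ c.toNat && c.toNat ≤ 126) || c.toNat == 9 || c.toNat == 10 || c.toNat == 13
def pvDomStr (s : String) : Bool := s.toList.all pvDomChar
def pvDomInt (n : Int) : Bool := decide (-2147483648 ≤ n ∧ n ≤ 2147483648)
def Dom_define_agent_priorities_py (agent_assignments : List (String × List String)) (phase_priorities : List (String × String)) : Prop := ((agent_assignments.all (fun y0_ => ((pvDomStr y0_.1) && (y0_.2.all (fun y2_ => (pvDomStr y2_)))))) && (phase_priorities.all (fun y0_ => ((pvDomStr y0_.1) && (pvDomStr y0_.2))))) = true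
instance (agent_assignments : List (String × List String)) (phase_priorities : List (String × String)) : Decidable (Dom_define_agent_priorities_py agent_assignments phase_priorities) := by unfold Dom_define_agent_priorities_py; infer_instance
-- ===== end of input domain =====

-- B replaces A's per-agent count dict, empty special case and if/elif cascade by one
-- max-reduction over numeric ranks (high=2, medium=1, low=0, default 0); objective: simpler.

-- ===== PORT A =====
-- phase_priorities.get(phase_id, "medium")  (dict lookup = first match in the assoc list)
def pvGetPrio (phase_priorities : List (String × String)) (p : String) : String :=
  (List.lookup p phase_priorities).getD "medium"

-- Literal port of A. 'priority_scores[phase_priority] += 1' raises KeyError in Python when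
-- phase_priority is not one of the three keys; Pre_ excludes those inputs (there this port's
-- Dict.modify with default 0 would add the key instead).
def define_agent_priorities_py (agent_assignments : List (String × List String)) (phase_priorities : List (String × String)) : List (String × String) :=
  (agent_assignments.foldl (fun acc pr =>
    if pr.2 = [] then acc.insert pr.1 "low"
    else
      let scores : PySem.Dict String Int :=
        pr.2.foldl (fun sc p => sc.modify (pvGetPrio phase_priorities p) 0 (· + 1))
          (((PySem.Dict.empty.insert "high" (0 : Int)).insert "medium" 0).insert "low" 0)
      if scores.getD "high" 0 > 0 then acc.insert pr.1 "high"
      else if scores.getD "medium" 0 > 0 then acc.insert pr.1 "medium"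
      else acc.insert pr.1 "low") PySem.Dict.empty).items

-- ===== PORT B =====
-- rank = {"high": 2, "medium": 1, "low": 0}; rank[v] raises KeyError on any other v — Pre_
-- excludes those inputs (there this total form returns 0).
def pvRank (v : String) : Int :=
  if v = "high" then 2 else if v = "medium" then 1 else 0

-- names = ["low", "medium", "high"]; names[m], exact for m in 0..2 (the only values reached).
def pvName (m : Int) : String :=
  if m = 2 then "high" else if m = 1 then "medium" else "low"

def define_agent_priorities_py_alt (agent_assignments : List (String × List String)) (phase_priorities : List (String × String)) : List (String × String) :=
  (agent_assignments.foldl (fun acc pr =>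
    acc.insert pr.1
      (pvName (pr.2.foldl (fun m p => max m (pvRank (pvGetPrio phase_priorities p))) 0)))
    PySem.Dict.empty).items

-- ===== PRECONDITION & SPEC =====
-- Pre_ excludes exactly the inputs where some assigned phase's priority (with the 'medium'
-- default) is not 'high'/'medium'/'low': there Python A raises KeyError (and Python B does too).
def Pre_define_agent_priorities_py (agent_assignments : List (String × List String)) (phase_priorities : List (String × String)) : Prop :=
  ∀ pr ∈ agent_assignments, ∀ p ∈ pr.2,
    pvGetPrio phase_priorities p = "high" ∨ pvGetPrio phase_priorities p = "medium" ∨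
    pvGetPrio phase_priorities p = "low"
instance (agent_assignments : List (String × List String)) (phase_priorities : List (String × String)) : Decidable (Pre_define_agent_priorities_py agent_assignments phase_priorities) := by unfold Pre_define_agent_priorities_py; infer_instance

def pvWitness_define_agent_priorities_py : (List (String × List String)) × (List (String × String)) :=
  ([("a", ["p1", "p2"]), ("b", [])], [("p1", "high")])

def Spec_define_agent_priorities_py (agent_assignments : List (String × List String)) (phase_priorities : List (String × String)) (out : List (String × String)) : Prop := out = define_agent_priorities_py_alt agent_assignments phase_priorities
instance (agent_assignments : List (String × List String)) (phase_priorities : List (String × String)) (out : List (String × String)) : Decidable (Spec_define_agent_priorities_py agent_assignments phase_priorities out) := by unfold Spec_define_agent_priorities_py; infer_instance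

-- ===== CLAIM (what is proved, stated in full; the proofs are below) =====
def Claim_equal_define_agent_priorities_py : Prop := ∀ (agent_assignments : List (String × List String)) (phase_priorities : List (String × String)), Dom_define_agent_priorities_py agent_assignments phase_priorities → Pre_define_agent_priorities_py agent_assignments phase_priorities → Spec_define_agent_priorities_py agent_assignments phase_priorities (define_agent_priorities_py agent_assignments phase_priorities)

-- ===== LEMMAS AND PROOFS =====

-- Per-agent agreement: A's count-and-cascade decision equals B's rank-max decision.
theorem pv_body_eq (pp : List (String × String)) (phases : List String) :
    (if phases = [] then "low"
     else
       let scores : PySem.Dict String Int :=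
         phases.foldl (fun sc p => sc.modify (pvGetPrio pp p) 0 (· + 1))
           (((PySem.Dict.empty.insert "high" (0 : Int)).insert "medium" 0).insert "low" 0)
       if scores.getD "high" 0 > 0 then "high"
       else if scores.getD "medium" 0 > 0 then "medium" else "low")
    = pvName (phases.foldl (fun m p => max m (pvRank (pvGetPrio pp p))) 0) := by
  by_cases h0 : phases = []
  · subst h0; norm_num [pvName]
  · simp only [if_neg h0]
    have hA : ∀ v : String,
        (phases.foldl (fun sc p => sc.modify (pvGetPrio pp p) 0 (· + 1))
          (((PySem.Dict.empty.insert "high" (0 : Int)).insert "medium" 0).insert "low" 0)).getD v 0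
        = (((PySem.Dict.empty.insert "high" (0 : Int)).insert "medium" 0).insert "low" 0).getD v 0
          + (phases.map (pvGetPrio pp)).count v := by
      intro v
      have hmap : phases.foldl (fun sc p => sc.modify (pvGetPrio pp p) 0 (· + 1))
            (((PySem.Dict.empty.insert "high" (0 : Int)).insert "medium" 0).insert "low" 0)
          = (phases.map (pvGetPrio pp)).foldl (fun sc x => sc.modify x 0 (· + 1))
            (((PySem.Dict.empty.insert "high" (0 : Int)).insert "medium" 0).insert "low" 0) :=
        (List.foldl_map (f := pvGetPrio pp) (g := fun (sc : PySem.Dict String Int) x => sc.modify x 0 (· + 1))).symm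
      rw [hmap]
      exact PySem.Dict.getD_foldl_modify_add_one _ _ _
    have hB : phases.foldl (fun m p => max m (pvRank (pvGetPrio pp p))) 0
        = ((phases.map (pvGetPrio pp)).map pvRank).foldl max 0 := by
      rw [List.foldl_map, List.foldl_map]
    set vs := phases.map (pvGetPrio pp) with hvs
    set rs := vs.map pvRank with hrs
    set m := rs.foldl max 0 with hm
    have hmem := PySem.List.foldl_max_mem rs 0
    have hle := PySem.List.le_foldl_max rs 0
    have hiH : ((((PySem.Dict.empty.insert "high" (0:Int)).insert "medium" 0).insert "low" 0)).getD "high" 0 = 0 := by decide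
    have hiM : ((((PySem.Dict.empty.insert "high" (0:Int)).insert "medium" 0).insert "low" 0)).getD "medium" 0 = 0 := by decide
    rw [hB]
    by_cases hH : "high" ∈ vs
    · have h2 : (2 : Int) ∈ rs := List.mem_map.mpr ⟨"high", hH, by unfold pvRank; simp⟩
      have hub : ∀ y ∈ rs, y ≤ 2 := by
        intro y hy
        rcases List.mem_map.mp hy with ⟨x, _, rfl⟩
        unfold pvRank; split_ifs <;> omega
      have hm' : m = 2 := by
        have h1 := hle.2 _ h2
        rcases hmem with h | h
        · omega
        · exact le_antisymm (hub _ h) h1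
      rw [hA "high", hiH, zero_add,
        if_pos (by exact_mod_cast List.count_pos_iff.mpr hH : (0:Int) < ↑(vs.count "high"))]
      simp [hm', pvName]
    · have hcH : vs.count "high" = 0 := List.count_eq_zero.mpr hH
      have hub1 : ∀ y ∈ rs, y ≤ 1 := by
        intro y hy
        rcases List.mem_map.mp hy with ⟨x, hx, rfl⟩
        have : x ≠ "high" := fun h => hH (h ▸ hx)
        unfold pvRank; rw [if_neg this]; split_ifs <;> omega
      rw [hA "high", hiH, zero_add, hcH,
        if_neg (by norm_num : ¬ ((0:Int) < ((0:Nat) : Int)))]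
      by_cases hM : "medium" ∈ vs
      · have h1 : (1 : Int) ∈ rs := List.mem_map.mpr ⟨"medium", hM, by unfold pvRank; simp⟩
        have hm' : m = 1 := by
          have hge := hle.2 _ h1
          rcases hmem with h | h
          · omega
          · exact le_antisymm (hub1 _ h) hge
        rw [hA "medium", hiM, zero_add,
          if_pos (by exact_mod_cast List.count_pos_iff.mpr hM : (0:Int) < ↑(vs.count "medium"))]
        simp [hm', pvName]
      · have hcM : vs.count "medium" = 0 := List.count_eq_zero.mpr hM
        have hz : ∀ y ∈ rs, y = 0 := by
          intro y hy
          rcases List.mem_map.mp hy with ⟨x, hx, rfl⟩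
          have hxh : x ≠ "high" := fun h => hH (h ▸ hx)
          have hxm : x ≠ "medium" := fun h => hM (h ▸ hx)
          unfold pvRank; rw [if_neg hxh, if_neg hxm]
        have hm' : m = 0 := by
          rcases hmem with h | h
          · exact h
          · exact hz _ h
        rw [hA "medium", hiM, zero_add, hcM,
          if_neg (by norm_num : ¬ ((0:Int) < ((0:Nat) : Int)))]
        simp [hm', pvName]

theorem define_agent_priorities_py_spec : Claim_equal_define_agent_priorities_py := by
  intro aa pp _ hpre
  unfold Spec_define_agent_priorities_py define_agent_priorities_py define_agent_priorities_py_alt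
  congr 1
  apply PySem.List.foldl_congr_mem
  intro acc pr _
  have hb := pv_body_eq pp pr.2
  by_cases h : pr.2 = []
  · rw [if_pos h]
    rw [if_pos h] at hb
    rw [h] at hb ⊢
    simp only [List.foldl_nil] at hb ⊢
    rw [hb]
  · rw [if_neg h]
    rw [if_neg h] at hb
    rw [← hb]
    dsimp only
    split_ifs <;> rfl
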